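-- pv_equiv track=rewrite | github.com/ravi4j/daily_market_automation | scripts/scan_sp500_news.py | group_by_sector
-- ===== SOURCE A (Python) =====
-- def group_by_sector(opportunities: list) -> dict:
--     """Group opportunities by sector"""
--     by_sector = {}
--     for opp in opportunities:
--         sector = opp.get('sector', 'Unknown')
--         if sector not in by_sector:
--             by_sector[sector] = []
--         by_sector[sector].append(opp)
--     return by_sector
-- ===== SOURCE B (Python) =====
-- def group_by_sector(opportunities: list) -> dict:
--     """Group opportunities by sector"""
--     sectors = list(dict.fromkeys(opp.get('sector', 'Unknown') for opp in opportunities))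
--     return {s: [opp for opp in opportunities if opp.get('sector', 'Unknown') == s]
--             for s in sectors}
-- ===== Notes on version B (the rewrite author's own statement) =====
-- stated objective: alternative
-- what changed: B replaces the incremental hash-bucketing loop (create-bucket-then-append per element) by a two-phase plan: dedupe the sector keys in first-occurrence order with dict.fromkeys, then build each group with one filter pass per sector.
import Mathlib
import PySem

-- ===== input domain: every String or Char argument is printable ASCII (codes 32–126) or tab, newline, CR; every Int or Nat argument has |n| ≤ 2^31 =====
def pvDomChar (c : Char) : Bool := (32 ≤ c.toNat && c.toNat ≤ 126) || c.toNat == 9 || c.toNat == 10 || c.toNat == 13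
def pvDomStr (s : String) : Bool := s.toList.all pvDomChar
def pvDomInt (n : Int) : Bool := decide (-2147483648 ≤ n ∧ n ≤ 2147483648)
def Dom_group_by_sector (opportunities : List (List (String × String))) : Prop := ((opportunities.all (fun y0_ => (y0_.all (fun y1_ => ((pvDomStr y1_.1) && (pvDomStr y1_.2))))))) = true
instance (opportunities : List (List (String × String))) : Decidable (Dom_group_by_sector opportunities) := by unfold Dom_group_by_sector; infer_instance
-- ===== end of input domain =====

-- B changes the plan (dedupe the sector keys first, then one filter pass per sector) with the same
-- result; equivalence is about the return value only.

-- ===== PORT A =====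
-- opp.get('sector', 'Unknown') : a Python-dict lookup on the association list opp
def pvSectorOf (opp : List (String × String)) : String :=
  (PySem.Dict.mk opp).getD "sector" "Unknown"

def group_by_sector (opportunities : List (List (String × String))) : List (String × List (List (String × String))) :=
  -- by_sector = {}; for opp in ...: if sector not in by_sector: by_sector[sector] = []; by_sector[sector].append(opp)
  let by_sector : PySem.Dict String (List (List (String × String))) :=
    opportunities.foldl (fun d opp =>
      let sector := pvSectorOf opp
      let d := if d.contains sector then d else d.insert sector []
      d.modify sector [] (fun l => l ++ [opp])) PySem.Dict.empty
  by_sector.items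

-- ===== PORT B =====
def group_by_sector_alt (opportunities : List (List (String × String))) : List (String × List (List (String × String))) :=
  -- sectors = list(dict.fromkeys(opp.get('sector','Unknown') for opp in opportunities))
  let sectors := PySem.Set.ofList (opportunities.map pvSectorOf)
  -- {s: [opp for opp in opportunities if opp.get('sector','Unknown') == s] for s in sectors}
  sectors.map (fun s => (s, opportunities.filter (fun opp => pvSectorOf opp == s)))

-- ===== PRECONDITION & SPEC =====
def Spec_group_by_sector (opportunities : List (List (String × String))) (out : List (String × List (List (String × String)))) : Prop := out = group_by_sector_alt opportunities
instance (opportunities : List (List (String × String))) (out : List (String × List (List (String × String)))) : Decidable (Spec_group_by_sector opportunities out) := by unfold Spec_group_by_sector; infer_instance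

-- ===== CLAIM (what is proved, stated in full; the proofs are below) =====
def Claim_equal_group_by_sector : Prop := ∀ (opportunities : List (List (String × String))), Dom_group_by_sector opportunities → Spec_group_by_sector opportunities (group_by_sector opportunities)

-- ===== LEMMAS AND PROOFS =====

-- One step of A's loop ('ensure the bucket exists, then append') is a plain modify.
theorem pvStep_eq (d : PySem.Dict String (List (List (String × String)))) (opp : List (String × String)) :
    ((if d.contains (pvSectorOf opp) then d else d.insert (pvSectorOf opp) []).modify
        (pvSectorOf opp) [] (fun l => l ++ [opp])) =
      d.modify (pvSectorOf opp) [] (fun l => l ++ [opp]) := by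
  by_cases h : d.contains (pvSectorOf opp)
  · simp [h]
  · have h' : d.contains (pvSectorOf opp) = false := by simpa using h
    simp [h', PySem.Dict.modify, PySem.Dict.getD_insert_self, PySem.Dict.insert_insert_self,
      PySem.Dict.getD_of_not_contains d [] h']

theorem pvFoldA_eq (l : List (List (String × String)))
    (d : PySem.Dict String (List (List (String × String)))) :
    (l.foldl (fun d opp =>
      let sector := pvSectorOf opp
      let d := if d.contains sector then d else d.insert sector []
      d.modify sector [] (fun l => l ++ [opp])) d) =
    l.foldl (fun d opp => d.modify (pvSectorOf opp) [] (fun l => l ++ [opp])) d := by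
  induction l generalizing d with
  | nil => rfl
  | cons o t ih => simp only [List.foldl_cons, pvStep_eq]

-- ===== VERDICT (by name: the statement is the Claim_ definition above) =====
theorem group_by_sector_spec : Claim_equal_group_by_sector := by
  intro opps _
  unfold Spec_group_by_sector group_by_sector group_by_sector_alt
  rw [pvFoldA_eq]
  set D := opps.foldl (fun d opp => d.modify (pvSectorOf opp) [] (fun l => l ++ [opp]))
    PySem.Dict.empty with hD
  have hnd : D.keys.Nodup := by
    rw [hD]
    exact PySem.Dict.nodup_keys_foldl_modify_key opps pvSectorOf []
      (fun d o l => l ++ [o]) PySem.Dict.empty (by simp [PySem.Dict.keys_empty])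
  have hkeys : D.keys = PySem.Set.ofList (opps.map pvSectorOf) := by
    rw [hD, PySem.Dict.keys_foldl_modify_key, PySem.Dict.keys_empty,
      PySem.Set.update_nil_left]
  have hget : ∀ c, D.getD c [] = opps.filter (fun o => pvSectorOf o == c) := by
    intro c
    have hmap : D = (opps.map (fun o => (pvSectorOf o, o))).foldl
        (fun d p => d.modify p.1 [] (fun l => l ++ [p.2])) PySem.Dict.empty := by
      rw [hD, List.foldl_map]
    rw [hmap, PySem.Dict.getD_foldl_modify_append]
    simp [List.filter_map, Function.comp_def]
  rw [PySem.Dict.items_eq_map_keys D hnd [], hkeys]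
  exact List.map_congr_left (fun s _ => by rw [hget s])
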